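-- pv_equiv track=rewrite | github.com/raold/second-brain | app/routes/v2_unified_api.py | _categorize_todo
-- ===== SOURCE A (Python) =====
-- def _categorize_todo(todo_text: str) -> str:
--     """Categorize TODO based on content"""
--     text_lower = todo_text.lower()
--
--     if any(word in text_lower for word in ["test", "testing", "pytest", "unit test"]):
--         return "testing"
--     elif any(word in text_lower for word in ["doc", "documentation", "readme"]):
--         return "documentation"
--     elif any(word in text_lower for word in ["fix", "bug", "error", "issue"]):
--         return "bugfix"
--     elif any(word in text_lower for word in ["feature", "implement", "add", "create"]):
--         return "feature"
--     elif any(word in text_lower for word in ["refactor", "cleanup", "optimize"]):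
--         return "refactoring"
--     elif any(word in text_lower for word in ["deploy", "ci", "cd", "pipeline"]):
--         return "devops"
--     else:
--         return "general"
-- ===== SOURCE B (Python) =====
-- _KEYWORD_RANKS = [
--     ("test", 0), ("testing", 0), ("pytest", 0), ("unit test", 0),
--     ("doc", 1), ("documentation", 1), ("readme", 1),
--     ("fix", 2), ("bug", 2), ("error", 2), ("issue", 2),
--     ("feature", 3), ("implement", 3), ("add", 3), ("create", 3),
--     ("refactor", 4), ("cleanup", 4), ("optimize", 4),
--     ("deploy", 5), ("ci", 5), ("cd", 5), ("pipeline", 5),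
-- ]
-- _CATEGORIES = ["testing", "documentation", "bugfix", "feature", "refactoring", "devops"]
--
-- def _categorize_todo(todo_text: str) -> str:
--     """Single positional scan (naive multi-pattern matcher): at each index of the
--     lower-cased text try every keyword with startswith and keep the minimal rank."""
--     t = todo_text.lower()
--     best = 6
--     for i in range(len(t) + 1):
--         for kw, rank in _KEYWORD_RANKS:
--             if rank < best and t.startswith(kw, i):
--                 best = rank
--     return _CATEGORIES[best] if best < 6 else "general"
-- ===== Notes on version B (the rewrite author's own statement) =====
-- stated objective: alternative
-- what changed: B is a naive multi-pattern matcher: one positional scan of the lower-cased text that tests every keyword with startswith at each index and keeps the minimal category rank, instead of A's elif chain of per-category substring membership tests.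
import Mathlib
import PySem

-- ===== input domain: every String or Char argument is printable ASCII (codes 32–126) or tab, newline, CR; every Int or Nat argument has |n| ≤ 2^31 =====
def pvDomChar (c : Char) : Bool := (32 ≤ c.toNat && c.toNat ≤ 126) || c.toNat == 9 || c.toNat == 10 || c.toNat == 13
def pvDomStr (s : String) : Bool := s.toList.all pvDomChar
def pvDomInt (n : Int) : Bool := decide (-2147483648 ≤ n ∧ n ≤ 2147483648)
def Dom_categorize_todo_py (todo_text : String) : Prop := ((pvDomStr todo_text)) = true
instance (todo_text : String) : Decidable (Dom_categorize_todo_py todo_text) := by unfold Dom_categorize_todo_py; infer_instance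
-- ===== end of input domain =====

-- B replaces A's elif chain of per-category substring tests by a single positional scan
-- (naive multi-pattern matcher) that keeps the minimal matched category rank (alternative; same cost).

-- ===== PORT A =====
def categorize_todo_py (todo_text : String) : String :=
  let text_lower := PySem.Str.lower todo_text
  if (["test", "testing", "pytest", "unit test"] : List String).any
      (fun word => PySem.Str.isIn word text_lower) then "testing"
  else if (["doc", "documentation", "readme"] : List String).any
      (fun word => PySem.Str.isIn word text_lower) then "documentation"
  else if (["fix", "bug", "error", "issue"] : List String).any
      (fun word => PySem.Str.isIn word text_lower) then "bugfix"
  else if (["feature", "implement", "add", "create"] : List String).any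
      (fun word => PySem.Str.isIn word text_lower) then "feature"
  else if (["refactor", "cleanup", "optimize"] : List String).any
      (fun word => PySem.Str.isIn word text_lower) then "refactoring"
  else if (["deploy", "ci", "cd", "pipeline"] : List String).any
      (fun word => PySem.Str.isIn word text_lower) then "devops"
  else "general"

-- ===== PORT B =====
def pvKeywordRanks : List (String × Nat) :=
  [("test", 0), ("testing", 0), ("pytest", 0), ("unit test", 0),
   ("doc", 1), ("documentation", 1), ("readme", 1),
   ("fix", 2), ("bug", 2), ("error", 2), ("issue", 2),
   ("feature", 3), ("implement", 3), ("add", 3), ("create", 3),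
   ("refactor", 4), ("cleanup", 4), ("optimize", 4),
   ("deploy", 5), ("ci", 5), ("cd", 5), ("pipeline", 5)]

def pvCategories : List String :=
  ["testing", "documentation", "bugfix", "feature", "refactoring", "devops"]

-- the inner loop of Source B: try every keyword at position i, keep the minimal rank
def pvScanPos (t : List Char) (best : Nat) (i : Nat) : Nat :=
  pvKeywordRanks.foldl
    (fun b kr =>
      if kr.2 < b ∧ PySem.Chars.startswith (List.drop i t) kr.1.toList = true then kr.2 else b)
    best

-- the outer loop of Source B over positions 0 .. len(t)
def pvBest (t : List Char) : Nat :=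
  (List.range (t.length + 1)).foldl (pvScanPos t) 6

def categorize_todo_py_alt (todo_text : String) : String :=
  let t := (PySem.Str.lower todo_text).toList
  let best := pvBest t
  if best < 6 then pvCategories.getD best "general" else "general"

-- ===== PRECONDITION & SPEC =====
def Spec_categorize_todo_py (todo_text : String) (out : String) : Prop := out = categorize_todo_py_alt todo_text
instance (todo_text : String) (out : String) : Decidable (Spec_categorize_todo_py todo_text out) := by unfold Spec_categorize_todo_py; infer_instance

-- ===== CLAIM (what is proved, stated in full; the proofs are below) =====
def Claim_equal_categorize_todo_py : Prop := ∀ (todo_text : String), Dom_categorize_todo_py todo_text → Spec_categorize_todo_py todo_text (categorize_todo_py todo_text)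

-- ===== LEMMAS AND PROOFS =====

-- generic facts about the inner fold
theorem pvInner_le (t : List Char) (i : Nat) (l : List (String × Nat)) (b : Nat) :
    l.foldl (fun b kr =>
      if kr.2 < b ∧ PySem.Chars.startswith (List.drop i t) kr.1.toList = true then kr.2 else b) b ≤ b := by
  induction l generalizing b with
  | nil => simp
  | cons kr rest ih =>
    simp only [List.foldl_cons]
    split_ifs with h
    · exact le_trans (ih kr.2) (le_of_lt h.1)
    · exact ih b

theorem pvInner_le_of_mem (t : List Char) (i : Nat) (l : List (String × Nat)) (b : Nat)
    (kr : String × Nat) (hm : kr ∈ l)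
    (hs : PySem.Chars.startswith (List.drop i t) kr.1.toList = true) :
    l.foldl (fun b kr =>
      if kr.2 < b ∧ PySem.Chars.startswith (List.drop i t) kr.1.toList = true then kr.2 else b) b ≤ kr.2 := by
  induction l generalizing b with
  | nil => simp at hm
  | cons hd rest ih =>
    simp only [List.foldl_cons]
    rcases List.mem_cons.mp hm with h | h
    · subst h
      split_ifs with hif
      · exact pvInner_le t i rest kr.2
      · have : ¬ kr.2 < b := fun hlt => hif ⟨hlt, hs⟩
        exact le_trans (pvInner_le t i rest b) (not_lt.mp this)
    · split_ifs <;> exact ih _ h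
  
theorem pvInner_cases (t : List Char) (i : Nat) (l : List (String × Nat)) (b : Nat) :
    l.foldl (fun b kr =>
      if kr.2 < b ∧ PySem.Chars.startswith (List.drop i t) kr.1.toList = true then kr.2 else b) b = b ∨
    ∃ kr ∈ l, PySem.Chars.startswith (List.drop i t) kr.1.toList = true ∧
      l.foldl (fun b kr =>
        if kr.2 < b ∧ PySem.Chars.startswith (List.drop i t) kr.1.toList = true then kr.2 else b) b = kr.2 := by
  induction l generalizing b with
  | nil => left; rfl
  | cons hd rest ih =>
    simp only [List.foldl_cons]
    split_ifs with hif
    · rcases ih hd.2 with h | ⟨kr, hm, hs, he⟩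
      · right; exact ⟨hd, List.mem_cons_self .., hif.2, h⟩
      · right; exact ⟨kr, List.mem_cons_of_mem _ hm, hs, he⟩
    · rcases ih b with h | ⟨kr, hm, hs, he⟩
      · left; exact h
      · right; exact ⟨kr, List.mem_cons_of_mem _ hm, hs, he⟩

-- generic facts about the outer fold
theorem pvOuter_le (t : List Char) (is : List Nat) (b : Nat) :
    is.foldl (pvScanPos t) b ≤ b := by
  induction is generalizing b with
  | nil => simp
  | cons i rest ih =>
    simp only [List.foldl_cons]
    exact le_trans (ih _) (pvInner_le t i pvKeywordRanks b)

theorem pvOuter_le_of_mem (t : List Char) (is : List Nat) (b : Nat) (i : Nat) (hi : i ∈ is)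
    (kr : String × Nat) (hm : kr ∈ pvKeywordRanks)
    (hs : PySem.Chars.startswith (List.drop i t) kr.1.toList = true) :
    is.foldl (pvScanPos t) b ≤ kr.2 := by
  induction is generalizing b with
  | nil => simp at hi
  | cons j rest ih =>
    simp only [List.foldl_cons]
    rcases List.mem_cons.mp hi with h | h
    · subst h
      exact le_trans (pvOuter_le t rest _) (pvInner_le_of_mem t i pvKeywordRanks b kr hm hs)
    · exact ih _ h

theorem pvOuter_cases (t : List Char) (is : List Nat) (b : Nat) :
    is.foldl (pvScanPos t) b = b ∨
    ∃ i ∈ is, ∃ kr ∈ pvKeywordRanks,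
      PySem.Chars.startswith (List.drop i t) kr.1.toList = true ∧
      is.foldl (pvScanPos t) b = kr.2 := by
  induction is generalizing b with
  | nil => left; rfl
  | cons i rest ih =>
    simp only [List.foldl_cons]
    rcases ih (pvScanPos t b i) with h | ⟨j, hj, kr, hm, hs, he⟩
    · rcases pvInner_cases t i pvKeywordRanks b with h2 | ⟨kr, hm, hs, he⟩
      · left; rw [h]; exact h2
      · right; exact ⟨i, List.mem_cons_self .., kr, hm, hs, by rw [h]; exact he⟩
    · right; exact ⟨j, List.mem_cons_of_mem _ hj, kr, hm, hs, he⟩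

-- "some keyword of rank k occurs in t"
def pvM (t : List Char) (k : Nat) : Prop :=
  ∃ kr ∈ pvKeywordRanks, kr.2 = k ∧ PySem.Chars.isIn kr.1.toList t = true

-- a matched keyword bounds pvBest
theorem pvBest_le_of_M (t : List Char) (k : Nat) (h : pvM t k) : pvBest t ≤ k := by
  obtain ⟨kr, hm, hk, hin⟩ := h
  obtain ⟨j, hj⟩ := (PySem.Chars.exists_prefix_drop_iff_isIn kr.1.toList t).mpr hin
  -- pick a position inside range (t.length + 1) where the keyword starts
  have hj' : kr.1.toList <+: t.drop (min j t.length) := by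
    rcases Nat.le_total j t.length with hle | hge
    · simpa [Nat.min_eq_left hle] using hj
    · have hnil : t.drop j = [] := List.drop_eq_nil_of_le hge
      rw [hnil] at hj
      have hkw : kr.1.toList = [] := List.prefix_nil.mp hj
      simp [Nat.min_eq_right hge, hkw]
  have hs : PySem.Chars.startswith (List.drop (min j t.length) t) kr.1.toList = true :=
    (PySem.Chars.startswith_iff _ _).mpr hj'
  have hmem : min j t.length ∈ List.range (t.length + 1) :=
    List.mem_range.mpr (Nat.lt_succ_of_le (Nat.min_le_right _ _))
  exact hk ▸ pvOuter_le_of_mem t _ 6 _ hmem kr hm hs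

-- pvBest below 6 is itself a matched rank
theorem pvM_pvBest (t : List Char) (h : pvBest t < 6) : pvM t (pvBest t) := by
  rcases pvOuter_cases t (List.range (t.length + 1)) 6 with he | ⟨i, _, kr, hm, hs, he⟩
  · rw [pvBest, he] at h; exact absurd h (lt_irrefl 6)
  · have hb : pvBest t = kr.2 := by rw [pvBest]; exact he
    refine ⟨kr, hm, hb.symm, ?_⟩
    exact (PySem.Chars.exists_prefix_drop_iff_isIn kr.1.toList t).mp
      ⟨i, (PySem.Chars.startswith_iff _ _).mp hs⟩

theorem pvBest_le_six (t : List Char) : pvBest t ≤ 6 := pvOuter_le t _ 6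

def pvGroups : List (List String) :=
  [["test", "testing", "pytest", "unit test"],
   ["doc", "documentation", "readme"],
   ["fix", "bug", "error", "issue"],
   ["feature", "implement", "add", "create"],
   ["refactor", "cleanup", "optimize"],
   ["deploy", "ci", "cd", "pipeline"]]

-- a keyword rank is matched iff A's corresponding group test fires
theorem pvM_iff_group (t : List Char) (k : Nat) (hk : k < 6) :
    pvM t k ↔ ((pvGroups.getD k []).any (fun w => PySem.Chars.isIn w.toList t)) = true := by
  rcases k with _|_|_|_|_|_|k
  · simp [pvM, pvKeywordRanks, pvGroups]
  · simp [pvM, pvKeywordRanks, pvGroups]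
  · simp [pvM, pvKeywordRanks, pvGroups]
  · simp [pvM, pvKeywordRanks, pvGroups]
  · simp [pvM, pvKeywordRanks, pvGroups]
  · simp [pvM, pvKeywordRanks, pvGroups]
  · omega

-- pvBest is the least matched rank (6 when none is matched)
theorem pvBest_eq (t : List Char) (k : Nat) (hk : k ≤ 6)
    (hself : k < 6 → pvM t k) (hlow : ∀ j, j < k → ¬ pvM t j) : pvBest t = k := by
  have hle : pvBest t ≤ k := by
    rcases Nat.lt_or_ge k 6 with h | h
    · exact pvBest_le_of_M t k (hself h)
    · exact le_trans (pvBest_le_six t) (by omega)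
  have : ¬ pvBest t < k := by
    intro hlt
    exact hlow _ hlt (pvM_pvBest t (lt_of_lt_of_le hlt hk))
  omega

-- ===== VERDICT (by name: the statement is the Claim_ definition above) =====
theorem categorize_todo_py_spec : Claim_equal_categorize_todo_py := by
  intro todo_text _
  unfold Spec_categorize_todo_py categorize_todo_py categorize_todo_py_alt
  simp only [PySem.Str.isIn_eq, PySem.Str.toList_lower]
  set u := PySem.Chars.lower todo_text.toList with hu
  by_cases h0 : ((["test", "testing", "pytest", "unit test"] : List String).any
      (fun w => PySem.Chars.isIn w.toList u)) = true
  · have hb : pvBest u = 0 := pvBest_eq u 0 (by omega)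
      (fun _ => (pvM_iff_group u 0 (by omega)).mpr (by simpa [pvGroups] using h0))
      (by omega)
    simp [h0, hb, pvCategories]
  · have hn0 : ¬ pvM u 0 := fun hm => h0 (by simpa [pvGroups] using (pvM_iff_group u 0 (by omega)).mp hm)
    by_cases h1 : ((["doc", "documentation", "readme"] : List String).any
        (fun w => PySem.Chars.isIn w.toList u)) = true
    · have hb : pvBest u = 1 := pvBest_eq u 1 (by omega)
        (fun _ => (pvM_iff_group u 1 (by omega)).mpr (by simpa [pvGroups] using h1))
        (by intro j hj; interval_cases j; exacts [hn0])
      simp [h0, h1, hb, pvCategories]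
    · have hn1 : ¬ pvM u 1 := fun hm => h1 (by simpa [pvGroups] using (pvM_iff_group u 1 (by omega)).mp hm)
      by_cases h2 : ((["fix", "bug", "error", "issue"] : List String).any
          (fun w => PySem.Chars.isIn w.toList u)) = true
      · have hb : pvBest u = 2 := pvBest_eq u 2 (by omega)
          (fun _ => (pvM_iff_group u 2 (by omega)).mpr (by simpa [pvGroups] using h2))
          (by intro j hj; interval_cases j; exacts [hn0, hn1])
        simp [h0, h1, h2, hb, pvCategories]
      · have hn2 : ¬ pvM u 2 := fun hm => h2 (by simpa [pvGroups] using (pvM_iff_group u 2 (by omega)).mp hm)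
        by_cases h3 : ((["feature", "implement", "add", "create"] : List String).any
            (fun w => PySem.Chars.isIn w.toList u)) = true
        · have hb : pvBest u = 3 := pvBest_eq u 3 (by omega)
            (fun _ => (pvM_iff_group u 3 (by omega)).mpr (by simpa [pvGroups] using h3))
            (by intro j hj; interval_cases j; exacts [hn0, hn1, hn2])
          simp [h0, h1, h2, h3, hb, pvCategories]
        · have hn3 : ¬ pvM u 3 := fun hm => h3 (by simpa [pvGroups] using (pvM_iff_group u 3 (by omega)).mp hm)
          by_cases h4 : ((["refactor", "cleanup", "optimize"] : List String).any
              (fun w => PySem.Chars.isIn w.toList u)) = true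
          · have hb : pvBest u = 4 := pvBest_eq u 4 (by omega)
              (fun _ => (pvM_iff_group u 4 (by omega)).mpr (by simpa [pvGroups] using h4))
              (by intro j hj; interval_cases j; exacts [hn0, hn1, hn2, hn3])
            simp [h0, h1, h2, h3, h4, hb, pvCategories]
          · have hn4 : ¬ pvM u 4 := fun hm => h4 (by simpa [pvGroups] using (pvM_iff_group u 4 (by omega)).mp hm)
            by_cases h5 : ((["deploy", "ci", "cd", "pipeline"] : List String).any
                (fun w => PySem.Chars.isIn w.toList u)) = true
            · have hb : pvBest u = 5 := pvBest_eq u 5 (by omega)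
                (fun _ => (pvM_iff_group u 5 (by omega)).mpr (by simpa [pvGroups] using h5))
                (by intro j hj; interval_cases j; exacts [hn0, hn1, hn2, hn3, hn4])
              simp [h0, h1, h2, h3, h4, h5, hb, pvCategories]
            · have hn5 : ¬ pvM u 5 := fun hm => h5 (by simpa [pvGroups] using (pvM_iff_group u 5 (by omega)).mp hm)
              have hb : pvBest u = 6 := pvBest_eq u 6 (by omega) (by omega)
                (by intro j hj; interval_cases j; exacts [hn0, hn1, hn2, hn3, hn4, hn5])
              simp [h0, h1, h2, h3, h4, h5, hb]
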